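-- pv_equiv track=rewrite | github.com/IAmAbszol/DailyProgrammingChallenges | Problem_31/solution.py | solve
-- ===== SOURCE A (Python) =====
-- def solve(str1, str2):
-- 	longest, shortest = (str1, str2) if len(str1) > len(str2) else (str1, str1)
--
-- 	# Preprocess string
-- 	sim_count = 0
-- 	for i, l in enumerate(longest):
-- 		count = 0
-- 		for j, s in enumerate(shortest):
-- 			if (i + j) >= len(longest):
-- 				break
-- 			if longest[i + j] == shortest[j]:
-- 				count += 1
-- 		if sim_count < count:
-- 			sim_count = count
-- 	return len(longest) - sim_count
-- ===== SOURCE B (Python) =====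
-- def solve(str1, str2):
--     longest, shortest = (str1, str2) if len(str1) > len(str2) else (str1, str1)
--     # index of positions per character in shortest
--     pos = {}
--     for j, c in enumerate(shortest):
--         pos.setdefault(c, []).append(j)
--     # diag[d] = number of matches at alignment offset d, filled in one pass over longest
--     diag = [0] * len(longest)
--     for p, c in enumerate(longest):
--         for j in pos.get(c, ()):
--             if j <= p:
--                 diag[p - j] += 1
--     sim = max(diag, default=0)
--     return len(longest) - sim
-- ===== Notes on version B (the rewrite author's own statement) =====
-- stated objective: faster
-- what changed: B replaces A's nested offset-by-offset rescans with a character-position index of the shorter string and a single pass over the longer string that accumulates match counts per alignment diagonal, touching only matching character pairs (A's longest/shortest selection line, including its else branch, is kept verbatim).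
import Mathlib
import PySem

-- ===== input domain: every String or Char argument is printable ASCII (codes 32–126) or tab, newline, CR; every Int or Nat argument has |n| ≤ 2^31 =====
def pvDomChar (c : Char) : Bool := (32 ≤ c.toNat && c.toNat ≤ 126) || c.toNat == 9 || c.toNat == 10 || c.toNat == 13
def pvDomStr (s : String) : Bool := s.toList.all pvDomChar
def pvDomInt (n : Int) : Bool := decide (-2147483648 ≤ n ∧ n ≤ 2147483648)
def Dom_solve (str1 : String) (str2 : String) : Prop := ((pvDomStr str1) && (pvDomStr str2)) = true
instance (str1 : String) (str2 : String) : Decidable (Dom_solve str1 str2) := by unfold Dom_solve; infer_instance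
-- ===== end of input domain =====

-- B: builds a char→positions index of the shorter string and accumulates per-diagonal match
-- counts in one pass over the longer string, touching only matching character pairs, instead of
-- A's nested offset-by-offset rescans; same return value everywhere (measured faster).

-- ===== PORT A =====
-- inner 'for j, s in enumerate(shortest)' loop with its break; count accumulator
def solveInnerA (L : List Char) (i : Nat) : List Char → Nat → Nat → Nat
  | [], _, count => count
  | s :: rest, j, count =>
    if L.length ≤ i + j then count
    else if L.getD (i + j) ' ' = s then solveInnerA L i rest (j + 1) (count + 1)
    else solveInnerA L i rest (j + 1) count

-- outer 'for i, l in enumerate(longest)' loop keeping the running maximum sim_count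
def solveOuterA (L S : List Char) : Nat :=
  (List.range L.length).foldl (fun sim i =>
    let count := solveInnerA L i S 0 0
    if sim < count then count else sim) 0

def solve (str1 : String) (str2 : String) : Int :=
  let ls := if str2.toList.length < str1.toList.length then (str1, str2) else (str1, str1)
  ((ls.1.toList.length : Int)) - (solveOuterA ls.1.toList ls.2.toList : Int)

-- ===== PORT B =====
-- 'for j, c in enumerate(shortest): pos.setdefault(c, []).append(j)'
def buildPosB : List Char → Nat → PySem.Dict Char (List Nat) → PySem.Dict Char (List Nat)
  | [], _, d => d
  | c :: rest, j, d => buildPosB rest (j + 1) (d.insert c (d.getD c [] ++ [j]))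

-- inner 'for j in pos.get(c, ()): if j <= p: diag[p - j] += 1'
def bumpDiagB (p : Nat) : List Nat → List Nat → List Nat
  | [], diag => diag
  | j :: rest, diag =>
    bumpDiagB p rest (if j ≤ p then diag.set (p - j) (diag.getD (p - j) 0 + 1) else diag)

-- outer 'for p, c in enumerate(longest)'
def diagLoopB (pos : PySem.Dict Char (List Nat)) : List Char → Nat → List Nat → List Nat
  | [], _, diag => diag
  | c :: rest, p, diag => diagLoopB pos rest (p + 1) (bumpDiagB p (pos.getD c []) diag)

def solve_alt (str1 : String) (str2 : String) : Int :=
  let ls := if str2.toList.length < str1.toList.length then (str1, str2) else (str1, str1)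
  let L := ls.1.toList
  let S := ls.2.toList
  let pos := buildPosB S 0 (PySem.Dict.mk [])
  let diag := diagLoopB pos L 0 (List.replicate L.length 0)
  -- max(diag, default=0): fold of Nat.max is exact, all entries are naturals
  let sim := diag.foldl Nat.max 0
  ((L.length : Int)) - (sim : Int)

-- ===== PRECONDITION & SPEC =====
def Spec_solve (str1 : String) (str2 : String) (out : Int) : Prop := out = solve_alt str1 str2
instance (str1 : String) (str2 : String) (out : Int) : Decidable (Spec_solve str1 str2 out) := by unfold Spec_solve; infer_instance

-- ===== CLAIM (what is proved, stated in full; the proofs are below) =====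
def Claim_equal_solve : Prop := ∀ (str1 : String) (str2 : String), Dom_solve str1 str2 → Spec_solve str1 str2 (solve str1 str2)

-- ===== LEMMAS AND PROOFS =====

-- number of aligned equal characters of two lists (truncated to the shorter)
def cntEq : List Char → List Char → Nat
  | a :: as, b :: bs => (if a = b then 1 else 0) + cntEq as bs
  | _, _ => 0

-- positions (from index k on) of character c in a list
def idxs : List Char → Nat → Char → List Nat
  | [], _, _ => []
  | s :: rest, k, c => (if s = c then [k] else []) ++ idxs rest (k + 1) c

theorem cntEq_nil_left (S : List Char) : cntEq [] S = 0 := by cases S <;> rfl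

theorem solveInnerA_eq (L : List Char) (i : Nat) :
    ∀ (S : List Char) (j c : Nat), solveInnerA L i S j c = c + cntEq (L.drop (i + j)) S := by
  intro S
  induction S with
  | nil => intro j c; simp [solveInnerA, cntEq]
  | cons s rest ih =>
    intro j c
    unfold solveInnerA
    by_cases h : L.length ≤ i + j
    · rw [if_pos h, List.drop_eq_nil_of_le h, cntEq_nil_left, Nat.add_zero]
    · rw [if_neg h]
      have h' : i + j < L.length := by omega
      rw [List.drop_eq_getElem_cons h']
      have hg : L.getD (i + j) ' ' = L[i + j] := List.getD_eq_getElem L ' ' h'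
      have hstep : i + (j + 1) = i + j + 1 := by omega
      by_cases he : L.getD (i + j) ' ' = s
      · rw [if_pos he, ih (j + 1) (c + 1)]
        have hq : L[i + j] = s := by rw [← hg, he]
        rw [hstep]
        simp [cntEq, hq]
        omega
      · rw [if_neg he, ih (j + 1) c]
        have hq : ¬ L[i + j] = s := by rw [← hg]; exact he
        rw [hstep]
        simp [cntEq, hq]

theorem buildPosB_getD (c : Char) :
    ∀ (S : List Char) (j : Nat) (d : PySem.Dict Char (List Nat)),
      (buildPosB S j d).getD c [] = d.getD c [] ++ idxs S j c := by
  intro S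
  induction S with
  | nil => intro j d; simp [buildPosB, idxs]
  | cons s rest ih =>
    intro j d
    unfold buildPosB idxs
    rw [ih]
    rw [PySem.Dict.getD_insert]
    by_cases h : c = s
    · subst h; simp
    · rw [if_neg h]
      have : ¬ s = c := fun hh => h hh.symm
      simp [this]

theorem idxs_countP_eq (c : Char) :
    ∀ (S : List Char) (k m : Nat),
      (idxs S k c).countP (fun j => decide (j = m)) =
        if k ≤ m ∧ m - k < S.length ∧ S.getD (m - k) ' ' = c then 1 else 0 := by
  intro S
  induction S with
  | nil => intro k m; simp [idxs]
  | cons s rest ih =>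
    intro k m
    unfold idxs
    rw [List.countP_append, ih (k + 1) m]
    by_cases hm : m = k
    · have h1 : ¬ (k + 1 ≤ m) := by omega
      have h2 : m - k = 0 := by omega
      have h3 : k ≤ m := by omega
      simp only [h1, false_and, if_false, h2, h3, true_and,
        List.length_cons, List.getD_cons_zero]
      by_cases hs : s = c
      · simp [hs, hm]
      · simp [hs, hm]
    · have hleft : (if s = c then [k] else []).countP (fun j => decide (j = m)) = 0 := by
        by_cases hs : s = c <;> simp [hs, List.countP_singleton]
        omega
      rw [hleft, Nat.zero_add]
      by_cases hk : k + 1 ≤ m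
      · have hle : k ≤ m := by omega
        have hmk : m - k = (m - (k + 1)) + 1 := by omega
        simp only [hk, hle, true_and, List.length_cons, hmk, List.getD_cons_succ,
          Nat.succ_lt_succ_iff]
      · have hklt : ¬ (k ≤ m) := by omega
        simp [hk, hklt]

-- value of a list after a set, via getD
theorem getD_set_eval (l : List Nat) (n d x : Nat) (hn : n < l.length) :
    (l.set n x).getD d 0 = if d = n then x else l.getD d 0 := by
  simp only [List.getD_eq_getElem?_getD, List.getElem?_set]
  by_cases h : d = n
  · subst h; simp [hn]
  · have h2 : ¬ n = d := fun hh => h hh.symm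
    simp [h, h2]

-- bump lemma: one inner pass adds, at each diagonal d, the number of indices j in js
-- with j ≤ p and p - j = d
theorem bumpDiagB_getD (p : Nat) :
    ∀ (js : List Nat) (diag : List Nat), p < diag.length →
      ((bumpDiagB p js diag).length = diag.length ∧
       ∀ d, (bumpDiagB p js diag).getD d 0 =
         diag.getD d 0 + js.countP (fun j => decide (j ≤ p ∧ p - j = d))) := by
  intro js
  induction js with
  | nil => intro diag _; exact ⟨rfl, fun d => by simp [bumpDiagB]⟩
  | cons j rest ih =>
    intro diag h
    unfold bumpDiagB
    by_cases hj : j ≤ p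
    · rw [if_pos hj]
      have hlen : (diag.set (p - j) (diag.getD (p - j) 0 + 1)).length = diag.length :=
        List.length_set
      have h' : p < (diag.set (p - j) (diag.getD (p - j) 0 + 1)).length := by
        rw [hlen]; exact h
      obtain ⟨l1, l2⟩ := ih _ h'
      refine ⟨by rw [l1, hlen], fun d => ?_⟩
      rw [l2 d, List.countP_cons]
      have hrange : p - j < diag.length := by omega
      rw [getD_set_eval _ _ _ _ hrange]
      by_cases hdj : d = p - j
      · subst hdj
        have hc : (decide (j ≤ p ∧ p - j = p - j)) = true := by simp [hj]
        rw [if_pos rfl, hc]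
        norm_num
        try omega
      · have hc : (decide (j ≤ p ∧ p - j = d)) = false := by
          simp only [decide_eq_false_iff_not]
          omega
        rw [if_neg hdj, hc]
        norm_num
        try omega
    · rw [if_neg hj]
      obtain ⟨l1, l2⟩ := ih diag h
      refine ⟨l1, fun d => ?_⟩
      rw [l2 d, List.countP_cons]
      have hc : (decide (j ≤ p ∧ p - j = d)) = false := by
        simp only [decide_eq_false_iff_not]
        omega
      rw [hc]
      norm_num
      try omega

theorem cntEq_nil_right : ∀ xs : List Char, cntEq xs [] = 0 := by
  intro xs; cases xs <;> rfl

theorem cntEq_snoc (a : Char) :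
    ∀ (xs S : List Char),
      cntEq (xs ++ [a]) S =
        cntEq xs S + (if xs.length < S.length ∧ S.getD xs.length ' ' = a then 1 else 0) := by
  intro xs
  induction xs with
  | nil =>
    intro S
    cases S with
    | nil => simp [cntEq_nil_right]
    | cons b bs =>
      rw [List.nil_append]
      have h1 : cntEq [a] (b :: bs) = (if a = b then 1 else 0) := by
        have hh : cntEq [a] (b :: bs) = (if a = b then 1 else 0) + cntEq [] bs := rfl
        rw [hh, cntEq_nil_left, Nat.add_zero]
      rw [h1, cntEq_nil_left]
      simp only [List.length_nil, List.length_cons, List.getD_cons_zero, Nat.zero_add]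
      by_cases h : a = b
      · subst h
        simp
      · have h2 : ¬ b = a := fun hh => h hh.symm
        simp [h, h2]
  | cons x xs ih =>
    intro S
    cases S with
    | nil => simp [cntEq_nil_right]
    | cons b bs =>
      simp only [List.cons_append, cntEq, ih bs, List.length_cons, List.getD_cons_succ,
        Nat.succ_lt_succ_iff]
      omega

theorem cntStep (L S : List Char) (p d : Nat) (hp : p < L.length) :
    cntEq ((L.take (p + 1)).drop d) S =
      cntEq ((L.take p).drop d) S +
        (if d ≤ p ∧ p - d < S.length ∧ S.getD (p - d) ' ' = L.getD p ' ' then 1 else 0) := by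
  have htake : L.take (p + 1) = L.take p ++ [L.getD p ' '] := by
    rw [List.take_succ, List.getElem?_eq_getElem hp, List.getD_eq_getElem L ' ' hp]
    rfl
  by_cases hd : d ≤ p
  · have hlen : (L.take p).length = p := by rw [List.length_take]; omega
    have hdrop : (L.take (p + 1)).drop d = ((L.take p).drop d) ++ [L.getD p ' '] := by
      rw [htake, List.drop_append, hlen]
      have hz : d - p = 0 := by omega
      rw [hz]
      simp
    rw [hdrop, cntEq_snoc]
    have hlen2 : ((L.take p).drop d).length = p - d := by
      rw [List.length_drop, hlen]
    rw [hlen2]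
    simp [hd]
  · have h1 : (L.take (p + 1)).drop d = [] := by
      apply List.drop_eq_nil_of_le
      rw [List.length_take]
      omega
    have h2 : (L.take p).drop d = [] := by
      apply List.drop_eq_nil_of_le
      rw [List.length_take]
      omega
    rw [h1, h2]
    simp [hd]

theorem countP_idxs_bridge (S : List Char) (p d : Nat) (c : Char) :
    (idxs S 0 c).countP (fun j => decide (j ≤ p ∧ p - j = d)) =
      if d ≤ p ∧ p - d < S.length ∧ S.getD (p - d) ' ' = c then 1 else 0 := by
  by_cases hd : d ≤ p
  · have hfun : (fun j => decide (j ≤ p ∧ p - j = d)) = (fun j => decide (j = p - d)) := by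
      funext j
      simp only [decide_eq_decide]
      omega
    rw [hfun, idxs_countP_eq c S 0 (p - d)]
    simp [hd]
  · have hzero : (idxs S 0 c).countP (fun j => decide (j ≤ p ∧ p - j = d)) = 0 := by
      apply List.countP_eq_zero.mpr
      intro j _
      simp only [decide_eq_true_eq]
      omega
    rw [hzero]
    simp [hd]

theorem diagLoopB_inv (L S : List Char) :
    ∀ (L' : List Char) (p : Nat) (diag : List Nat),
      L.drop p = L' → diag.length = L.length →
      (∀ d, diag.getD d 0 = cntEq ((L.take p).drop d) S) →
      (diagLoopB (buildPosB S 0 (PySem.Dict.mk [])) L' p diag).length = L.length ∧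
        ∀ d, (diagLoopB (buildPosB S 0 (PySem.Dict.mk [])) L' p diag).getD d 0 =
          cntEq (L.drop d) S := by
  intro L'
  induction L' with
  | nil =>
    intro p diag hdrop hlen hval
    have hple : L.length ≤ p := by
      by_contra hlt
      push_neg at hlt
      have := List.drop_eq_nil_iff.mp hdrop
      omega
    have htake : L.take p = L := List.take_of_length_le hple
    exact ⟨hlen, fun d => by rw [diagLoopB, hval d, htake]⟩
  | cons c rest ih =>
    intro p diag hdrop hlen hval
    have hp : p < L.length := by
      by_contra hge
      push_neg at hge
      rw [List.drop_eq_nil_of_le hge] at hdrop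
      simp at hdrop
    have hgc : L.getD p ' ' = c := by
      have h0 : L[p]? = some c := by
        have hh : (L.drop p).head? = some c := by rw [hdrop]; rfl
        rwa [List.head?_drop] at hh
      simp [List.getD_eq_getElem?_getD, h0]
    have hrest : L.drop (p + 1) = rest := by
      have ht := congrArg List.tail hdrop
      rwa [List.tail_drop] at ht
    have hpd : p < diag.length := by omega
    obtain ⟨blen, bval⟩ :=
      bumpDiagB_getD p ((buildPosB S 0 (PySem.Dict.mk [])).getD c []) diag hpd
    rw [diagLoopB]
    apply ih (p + 1) _ hrest (by rw [blen, hlen])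
    intro d
    rw [bval d, hval d, buildPosB_getD, cntStep L S p d hp, hgc]
    have hempty : (PySem.Dict.mk ([] : List (Char × List Nat))).getD c [] = [] := rfl
    rw [hempty, List.nil_append, countP_idxs_bridge]

theorem if_lt_eq_max (a b : Nat) : (if a < b then b else a) = Nat.max a b := by
  show _ = max a b
  rw [Nat.max_def]
  split_ifs <;> omega

theorem main_core (L S : List Char) :
    solveOuterA L S =
      (diagLoopB (buildPosB S 0 (PySem.Dict.mk [])) L 0 (List.replicate L.length 0)).foldl
        Nat.max 0 := by
  obtain ⟨hlen, hval⟩ :=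
    diagLoopB_inv L S L 0 (List.replicate L.length 0) (by simp) (by simp)
      (fun d => by
        simp [List.getD_eq_getElem?_getD, List.getElem?_replicate, cntEq_nil_left]
        split <;> rfl)
  have hB : diagLoopB (buildPosB S 0 (PySem.Dict.mk [])) L 0 (List.replicate L.length 0) =
      (List.range L.length).map (fun d => cntEq (L.drop d) S) := by
    apply List.ext_getElem
    · rw [hlen]; simp
    · intro n h1 h2
      have hn : n < L.length := by rwa [hlen] at h1
      rw [← List.getD_eq_getElem _ 0 h1, hval n]
      simp
  have hA : solveOuterA L S =
      (List.range L.length).foldl (fun sim i => Nat.max sim (cntEq (L.drop i) S)) 0 := by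
    unfold solveOuterA
    congr 1
    funext sim i
    have hinner : solveInnerA L i S 0 0 = cntEq (L.drop i) S := by
      rw [solveInnerA_eq L i S 0 0]
      simp
    simp only [hinner]
    exact if_lt_eq_max sim (cntEq (L.drop i) S)
  rw [hA, hB, List.foldl_map]

-- ===== VERDICT (by name: the statement is the Claim_ definition above) =====
theorem solve_spec : Claim_equal_solve := by
  intro str1 str2 _
  unfold Spec_solve solve solve_alt
  by_cases h : str2.toList.length < str1.toList.length <;>
    simp only [h, if_true, if_false] <;>
    rw [main_core]
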